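-- pv_equiv track=rewrite | github.com/AndrejLiptak/schoolwork | Python/class3.py | kth_prime
-- ===== SOURCE A (Python) =====
-- def is_prime(n):
--     if n == 1:
--         return False
--     for i in range(2, n):
--         if n % i == 0:
--             return False
--     return True
--
-- def kth_prime(k):
--     prime_count = 0
--     n = 1
--     while prime_count < k:
--         n += 1
--         if is_prime(n):
--             prime_count += 1
--     return n
-- ===== SOURCE B (Python) =====
-- def kth_prime(k):
--     primes = []
--     n = 1
--     while len(primes) < k:
--         n += 1
--         if all(n % p != 0 for p in primes if p * p <= n):
--             primes.append(n)
--     return n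
-- ===== Notes on version B (the rewrite author's own statement) =====
-- stated objective: faster
-- what changed: B maintains the list of primes found so far and tests each candidate only by the stored primes p with p*p <= n, instead of A's trial division by every integer in 2..n-1.
import Mathlib
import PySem

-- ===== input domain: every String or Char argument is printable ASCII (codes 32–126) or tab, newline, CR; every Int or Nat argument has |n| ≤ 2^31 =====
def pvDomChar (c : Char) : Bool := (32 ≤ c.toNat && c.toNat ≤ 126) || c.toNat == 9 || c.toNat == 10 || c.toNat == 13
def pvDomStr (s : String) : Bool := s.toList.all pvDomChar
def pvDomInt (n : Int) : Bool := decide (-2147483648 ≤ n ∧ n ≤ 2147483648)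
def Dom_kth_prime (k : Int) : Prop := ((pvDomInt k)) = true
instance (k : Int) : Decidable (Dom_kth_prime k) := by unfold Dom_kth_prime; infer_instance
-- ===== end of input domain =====

-- B replaces A's trial division by every integer in 2..n-1 with trial division by the
-- already-found primes p with p*p <= n (objective: faster).

-- Termination helper for both loops: the smallest prime strictly above n (used only in the
-- termination measure; erased at runtime).
theorem nextP_ex (n : Int) : ∃ p : ℕ, n < (p : Int) ∧ p.Prime := by
  obtain ⟨p, hp, hpp⟩ := Nat.exists_infinite_primes (n.toNat + 1)
  exact ⟨p, by have := Int.self_le_toNat n; omega, hpp⟩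

def nextP (n : Int) : ℕ := Nat.find (nextP_ex n)

theorem nextP_mem (n : Int) : n < (nextP n : Int) ∧ (nextP n).Prime := Nat.find_spec (nextP_ex n)

theorem nextP_succ (n : Int) (h : ¬ (2 ≤ n + 1 ∧ (n + 1).toNat.Prime)) :
    nextP (n + 1) = nextP n := by
  apply Nat.find_congr'
  intro p
  constructor
  · rintro ⟨h1, h2⟩; exact ⟨by omega, h2⟩
  · rintro ⟨h1, h2⟩
    refine ⟨?_, h2⟩
    rcases lt_or_eq_of_le (by omega : n + 1 ≤ (p : Int)) with hlt | heq
    · exact hlt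
    · have h3 := h2.two_le
      exact absurd ⟨by omega, by rw [(by omega : (n + 1).toNat = p)]; exact h2⟩ h

-- ===== PORT A =====
def is_prime (n : Int) : Bool :=
  if n = 1 then false
  else (PySem.List.pyRange 2 n 1).all (fun i => !(PySem.Int.mod n i == 0))

-- used by kthLoop's termination: a candidate rejected by is_prime is not a prime
theorem is_prime_false (m : Int) (h : is_prime m = false) : ¬ (2 ≤ m ∧ m.toNat.Prime) := by
  rintro ⟨hm2, hp⟩
  unfold is_prime at h
  rw [if_neg (by omega)] at h
  rw [List.all_eq_false] at h
  obtain ⟨i, hi, hdvd⟩ := h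
  rw [PySem.List.mem_pyRange_one] at hi
  simp [PySem.Int.mod_eq_zero_iff_dvd] at hdvd
  have hnd : i.toNat ∣ m.toNat := by
    have h1 := Int.natAbs_dvd_natAbs.mpr hdvd
    rwa [(by omega : i.toNat = i.natAbs), (by omega : m.toNat = m.natAbs)]
  rcases (Nat.Prime.eq_one_or_self_of_dvd hp i.toNat hnd) with h1 | h1 <;> omega

def kthLoop (k count n : Int) : Int :=
  if h : count < k then
    if hp : is_prime (n + 1) then kthLoop k (count + 1) (n + 1)
    else kthLoop k count (n + 1)
  else n
termination_by ((k - count).toNat, ((nextP n : Int) - n).toNat)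
decreasing_by
  · exact Prod.Lex.left _ _ (by omega)
  · have h1 := nextP_mem n
    have h2 := nextP_succ n (is_prime_false (n + 1) (by simpa using hp))
    exact Prod.Lex.right _ (by omega)

def kth_prime (k : Int) : Int := kthLoop k 0 1

-- ===== PORT B =====
def altCheck (n : Int) (primes : List Int) : Bool :=
  primes.all (fun p => if p * p ≤ n then !(PySem.Int.mod n p == 0) else true)

-- used by altLoop's termination: a candidate rejected by altCheck has a nontrivial divisor
theorem altCheck_false (m : Int) (primes : List Int) (hm : 2 ≤ m)
    (hp : ∀ p ∈ primes, 2 ≤ p) (h : altCheck m primes = false) : ¬ m.toNat.Prime := by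
  intro hprime
  unfold altCheck at h
  rw [List.all_eq_false] at h
  obtain ⟨p, hpm, hpf⟩ := h
  have hp2 := hp p hpm
  by_cases hle : p * p ≤ m
  · rw [if_pos hle] at hpf
    simp [PySem.Int.mod_eq_zero_iff_dvd] at hpf
    have hnd : p.toNat ∣ m.toNat := by
      have h1 := Int.natAbs_dvd_natAbs.mpr hpf
      rwa [(by omega : p.toNat = p.natAbs), (by omega : m.toNat = m.natAbs)]
    have hplt : p < m := by nlinarith
    rcases (Nat.Prime.eq_one_or_self_of_dvd hprime p.toNat hnd) with h1 | h1 <;> omega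
  · rw [if_neg hle] at hpf; simp at hpf

def altLoop (k : Int) (primes : List Int) (n : Int)
    (hn : 1 ≤ n) (hp : ∀ p ∈ primes, 2 ≤ p) : Int :=
  if h : (primes.length : Int) < k then
    if hc : altCheck (n + 1) primes then
      altLoop k (primes ++ [n + 1]) (n + 1) (by omega)
        (by intro p hmem
            rcases List.mem_append.mp hmem with h1 | h1
            · exact hp p h1
            · simp at h1; omega)
    else altLoop k primes (n + 1) (by omega) hp
  else n
termination_by ((k - primes.length).toNat, ((nextP n : Int) - n).toNat)
decreasing_by
  · exact Prod.Lex.left _ _ (by simp; omega)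
  · have h1 := nextP_mem n
    have h2 := nextP_succ n (by
      rintro ⟨hm2, hpr⟩
      exact altCheck_false (n + 1) primes (by omega) hp (by simpa using hc) hpr)
    exact Prod.Lex.right _ (by omega)

def kth_prime_alt (k : Int) : Int := altLoop k [] 1 (by omega) (by simp)

-- ===== PRECONDITION & SPEC =====
def Spec_kth_prime (k : Int) (out : Int) : Prop := out = kth_prime_alt k
instance (k : Int) (out : Int) : Decidable (Spec_kth_prime k out) := by unfold Spec_kth_prime; infer_instance

-- ===== CLAIM (what is proved, stated in full; the proofs are below) =====
def Claim_equal_kth_prime : Prop := ∀ (k : Int), Dom_kth_prime k → Spec_kth_prime k (kth_prime k)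

-- ===== LEMMAS AND PROOFS =====

-- is_prime agrees with Nat.Prime on integers ≥ 2
theorem is_prime_iff (m : Int) (hm : 2 ≤ m) : is_prime m = true ↔ m.toNat.Prime := by
  constructor
  · intro h
    rw [Nat.prime_def_lt]
    refine ⟨by omega, ?_⟩
    intro a ha hdvd
    by_contra hne
    have ha2 : 2 ≤ a := by
      rcases Nat.eq_zero_or_pos a with h0 | h0
      · subst h0; simp at hdvd; omega
      · omega
    have hfalse : is_prime m = false := by
      unfold is_prime
      rw [if_neg (by omega)]
      rw [List.all_eq_false]
      refine ⟨(a : Int), ?_, ?_⟩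
      · rw [PySem.List.mem_pyRange_one]; constructor <;> [omega; omega]
      · simp [PySem.Int.mod_eq_zero_iff_dvd]
        have : (a : Int) ∣ (m.toNat : Int) := Int.natCast_dvd_natCast.mpr hdvd
        rwa [Int.toNat_of_nonneg (by omega)] at this
    rw [h] at hfalse; exact Bool.noConfusion hfalse
  · intro h
    by_contra hf
    exact is_prime_false m (by simpa using hf) ⟨hm, h⟩

-- the invariant for the prime list
def PrimesInv (primes : List Int) (n : Int) : Prop :=
  ∀ p : Int, p ∈ primes ↔ 2 ≤ p ∧ p ≤ n ∧ p.toNat.Prime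

-- the two per-candidate tests agree when primes holds exactly the primes ≤ n
theorem check_eq (n : Int) (hn : 1 ≤ n) (primes : List Int) (hinv : PrimesInv primes n) :
    is_prime (n + 1) = altCheck (n + 1) primes := by
  by_cases hpr : (n + 1).toNat.Prime
  · rw [(is_prime_iff (n + 1) (by omega)).mpr hpr]
    symm
    unfold altCheck
    rw [List.all_eq_true]
    intro p hmem
    obtain ⟨hp2, hpn, hpp⟩ := (hinv p).mp hmem
    by_cases hle : p * p ≤ n + 1
    · rw [if_pos hle]
      simp [PySem.Int.mod_eq_zero_iff_dvd]
      intro hmod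
      have hnd : p.toNat ∣ (n + 1).toNat := by
        have h1 := Int.natAbs_dvd_natAbs.mpr hmod
        rwa [(by omega : p.toNat = p.natAbs), (by omega : (n + 1).toNat = (n + 1).natAbs)]
      rcases (Nat.Prime.eq_one_or_self_of_dvd hpr p.toNat hnd) with h1 | h1 <;> omega
    · rw [if_neg hle]
  · have hA : is_prime (n + 1) = false := by
      by_contra hne
      exact hpr ((is_prime_iff (n + 1) (by omega)).mp (by simpa using hne))
    rw [hA]
    symm
    -- find the minimal prime factor; it is ≤ √(n+1), hence in `primes`
    set N := (n + 1).toNat with hN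
    have hN2 : 2 ≤ N := by omega
    have hq : N.minFac.Prime := Nat.minFac_prime (by omega)
    have hqd : N.minFac ∣ N := Nat.minFac_dvd N
    have hsq : N.minFac * N.minFac ≤ N := by
      have := Nat.minFac_sq_le_self (by omega : 0 < N) hpr
      simpa [Nat.pow_two] using this
    have hq2 : 2 ≤ N.minFac := hq.two_le
    have hle : (N.minFac : Int) * (N.minFac : Int) ≤ n + 1 := by
      have h1 : ((N.minFac * N.minFac : ℕ) : Int) ≤ (N : Int) := by exact_mod_cast hsq
      push_cast at h1
      omega
    have hqn : (N.minFac : Int) ≤ n := by nlinarith [hle, (by exact_mod_cast hq2 : (2:Int) ≤ (N.minFac : Int))]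
    have hmem : (N.minFac : Int) ∈ primes := by
      rw [hinv]
      refine ⟨by exact_mod_cast hq2, hqn, by simpa using hq⟩
    unfold altCheck
    rw [List.all_eq_false]
    refine ⟨(N.minFac : Int), hmem, ?_⟩
    rw [if_pos hle]
    simp [PySem.Int.mod_eq_zero_iff_dvd]
    have : (N.minFac : Int) ∣ (N : Int) := Int.natCast_dvd_natCast.mpr hqd
    rwa [hN, Int.toNat_of_nonneg (by omega)] at this

-- main bisimulation: the two loops agree whenever the invariant holds
theorem loop_eq : ∀ (k count n : Int), ∀ (primes : List Int) (hn : 1 ≤ n)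
    (hp : ∀ p ∈ primes, 2 ≤ p), count = (primes.length : Int) → PrimesInv primes n →
    kthLoop k count n = altLoop k primes n hn hp := by
  intro k count n
  induction count, n using kthLoop.induct (k := k) with
  | case1 count n h hpr ih =>
    intro primes hn hp hlen hinv
    have hc : altCheck (n + 1) primes = true := by rw [← check_eq n hn primes hinv]; exact hpr
    rw [kthLoop, altLoop]
    rw [dif_pos h, dif_pos hpr, dif_pos (show (primes.length : Int) < k by omega), dif_pos hc]
    apply ih
    · simp; omega
    · intro p
      constructor
      · intro hmem
        rcases List.mem_append.mp hmem with h1 | h1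
        · obtain ⟨a, b, c⟩ := (hinv p).mp h1; exact ⟨a, by omega, c⟩
        · simp at h1
          subst h1
          exact ⟨by omega, le_refl _, (is_prime_iff (n + 1) (by omega)).mp hpr⟩
      · rintro ⟨h1, h2, h3⟩
        rcases lt_or_eq_of_le h2 with hlt | heq
        · exact List.mem_append.mpr (Or.inl ((hinv p).mpr ⟨h1, by omega, h3⟩))
        · subst heq; exact List.mem_append.mpr (Or.inr (by simp))
  | case2 count n h hpr ih =>
    intro primes hn hp hlen hinv
    have hc : altCheck (n + 1) primes = false := by
      rw [← check_eq n hn primes hinv]; simpa using hpr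
    rw [kthLoop, altLoop]
    rw [dif_pos h, dif_neg hpr, dif_pos (show (primes.length : Int) < k by omega),
      dif_neg (show ¬ altCheck (n + 1) primes = true by simp [hc])]
    apply ih
    · exact hlen
    · intro p
      rw [hinv p]
      constructor
      · rintro ⟨a, b, c⟩; exact ⟨a, by omega, c⟩
      · rintro ⟨a, b, c⟩
        refine ⟨a, ?_, c⟩
        rcases lt_or_eq_of_le b with hlt | heq
        · omega
        · exfalso
          apply is_prime_false (n + 1) (by simpa using hpr)
          exact ⟨by omega, heq ▸ c⟩
  | case3 count n h =>
    intro primes hn hp hlen hinv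
    rw [kthLoop, altLoop]
    rw [dif_neg h, dif_neg (show ¬ (primes.length : Int) < k by omega)]

-- ===== VERDICT (by name: the statement is the Claim_ definition above) =====
theorem kth_prime_spec : Claim_equal_kth_prime := by
  intro k _
  unfold Spec_kth_prime kth_prime kth_prime_alt
  refine loop_eq k 0 1 [] (by omega) (by simp) (by simp) ?_
  intro p
  constructor
  · intro h; simp at h
  · rintro ⟨a, b, c⟩; omega
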